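-- pv_equiv track=rewrite | github.com/danschiff/quarterly-commitments | report.py | _group_by_initiative
-- ===== SOURCE A (Python) =====
-- def _group_by_initiative(epics):
--     """Return epics grouped by initiative, preserving encounter order.
--
--     Returns a list of (initiative_key, initiative_summary, [epics]) tuples.
--     Epics with no parent initiative are grouped last under (None, None, ...).
--     """
--     order = []        # preserves first-seen order of initiative keys
--     groups = {}       # initiative_key -> {"summary": str, "epics": list}
--
--     for epic in epics:
--         ikey = epic.get("initiative_key")
--         if ikey not in groups:
--             order.append(ikey)
--             groups[ikey] = {
--                 "summary": epic.get("initiative_summary"),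
--                 "epics": [],
--             }
--         groups[ikey]["epics"].append(epic)
--
--     # Sort: named initiatives first (alphabetically by key), None last
--     named = sorted(
--         (k for k in order if k is not None),
--         key=lambda k: k or ""
--     )
--     order_sorted = named + ([None] if None in groups else [])
--
--     return [
--         (k, groups[k]["summary"], groups[k]["epics"])
--         for k in order_sorted
--     ]
-- ===== SOURCE B (Python) =====
-- def _group_by_initiative(epics):
--     """Simpler: distinct keys via a set, sort named keys, one filter pass per group."""
--     keys = {e.get("initiative_key") for e in epics}
--     named = sorted(k for k in keys if k is not None)
--     ordered = named + ([None] if None in keys else [])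
--     result = []
--     for k in ordered:
--         group = [e for e in epics if e.get("initiative_key") == k]
--         result.append((k, group[0].get("initiative_summary"), group))
--     return result
-- ===== Notes on version B (the rewrite author's own statement) =====
-- stated objective: simpler
-- what changed: B drops A's one-pass dict-of-lists accumulation with a first-seen order list and instead takes the set of distinct initiative keys, sorts the named ones, and builds each group (and its first-epic summary) by one filter pass over the input per key.
import Mathlib
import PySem

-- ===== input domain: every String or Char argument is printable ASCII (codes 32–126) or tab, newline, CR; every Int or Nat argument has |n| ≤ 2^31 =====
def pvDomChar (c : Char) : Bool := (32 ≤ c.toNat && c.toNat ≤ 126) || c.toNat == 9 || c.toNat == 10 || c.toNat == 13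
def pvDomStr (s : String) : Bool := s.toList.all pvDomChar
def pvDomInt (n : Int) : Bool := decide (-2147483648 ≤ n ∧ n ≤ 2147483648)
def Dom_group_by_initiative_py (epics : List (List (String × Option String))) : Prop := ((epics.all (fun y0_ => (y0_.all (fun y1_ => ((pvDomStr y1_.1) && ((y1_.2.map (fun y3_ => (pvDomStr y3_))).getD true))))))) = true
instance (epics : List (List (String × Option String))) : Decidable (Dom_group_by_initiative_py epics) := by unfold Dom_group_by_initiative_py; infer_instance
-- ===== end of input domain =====

-- B is SIMPLER: instead of A's one-pass dict-of-lists accumulation plus an order list,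
-- B takes the set of distinct keys, sorts the named ones, and builds each group by one
-- filter pass over the input (return value only; neither version mutates its argument).

-- epic.get(k) : a missing key and a stored None both yield None (value type is Option String)
def pvGet (e : List (String × Option String)) (k : String) : Option String :=
  (PySem.Dict.mk e).getD k none

-- ===== PORT A =====
-- loop body: ikey = epic.get("initiative_key"); if ikey not in groups: append/init; groups[ikey]["epics"].append(epic)
-- the {"summary": …, "epics": …} record is modelled as a pair (summary, epics)
def pvAstep (st : List (Option String) × PySem.Dict (Option String) (Option String × List (List (String × Option String))))
    (epic : List (String × Option String)) :
    List (Option String) × PySem.Dict (Option String) (Option String × List (List (String × Option String))) :=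
  let ikey := pvGet epic "initiative_key"
  let st1 := if st.2.contains ikey then st
             else (st.1 ++ [ikey], st.2.insert ikey (pvGet epic "initiative_summary", []))
  (st1.1, st1.2.modify ikey (none, []) (fun g => (g.1, g.2 ++ [epic])))

def group_by_initiative_py (epics : List (List (String × Option String))) :
    List (Option String × Option String × (List (List (String × Option String)))) :=
  let st := epics.foldl pvAstep ([], PySem.Dict.empty)
  -- named = sorted((k for k in order if k is not None), key=lambda k: k or "")
  let named := PySem.List.sorted (st.1.filter (fun k => k.isSome)) (fun k => k.getD "") false
  let order_sorted := named ++ (if st.2.contains none then [(none : Option String)] else [])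
  -- groups[k]: the key is always present; getD's default is never used
  order_sorted.map (fun k => (k, (st.2.getD k (none, [])).1, (st.2.getD k (none, [])).2))

-- ===== PORT B =====
def group_by_initiative_py_alt (epics : List (List (String × Option String))) :
    List (Option String × Option String × (List (List (String × Option String)))) :=
  let keys : PySem.Set (Option String) := PySem.Set.ofList (epics.map (fun e => pvGet e "initiative_key"))
  -- named = sorted(k for k in keys if k is not None)  (distinct strings: order is key-independent)
  let named : List String := PySem.List.sorted (keys.filterMap id) (fun s => s) false
  let ordered := named.map some ++ (if PySem.Set.contains keys none then [(none : Option String)] else [])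
  ordered.map (fun k =>
    let group := epics.filter (fun e => pvGet e "initiative_key" == k)
    -- group[0]: group is never empty (k is the key of some epic); pyGet? is none only then
    (k, ((PySem.List.pyGet? group 0).map (fun e => pvGet e "initiative_summary")).join, group))

-- ===== PRECONDITION & SPEC =====
def Spec_group_by_initiative_py (epics : List (List (String × Option String))) (out : List (Option String × Option String × (List (List (String × Option String))))) : Prop := out = group_by_initiative_py_alt epics
instance (epics : List (List (String × Option String))) (out : List (Option String × Option String × (List (List (String × Option String))))) : Decidable (Spec_group_by_initiative_py epics out) := by unfold Spec_group_by_initiative_py; infer_instance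

-- ===== CLAIM (what is proved, stated in full; the proofs are below) =====
def Claim_equal_group_by_initiative_py : Prop := ∀ (epics : List (List (String × Option String))), Dom_group_by_initiative_py epics → Spec_group_by_initiative_py epics (group_by_initiative_py epics)

-- ===== LEMMAS AND PROOFS =====

abbrev pvEpic := List (String × Option String)

def pvKey (e : pvEpic) : Option String := pvGet e "initiative_key"
def pvSum (e : pvEpic) : Option String := pvGet e "initiative_summary"

-- the state A's fold reaches after processing xs
lemma pv_mem_key_iff (xs : List pvEpic) (k : Option String) :
    k ∈ xs.map pvKey ↔ xs.filter (fun e => pvKey e == k) ≠ [] := by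
  constructor
  · intro h hnil
    obtain ⟨a, ha, rfl⟩ := List.mem_map.mp h
    have := List.filter_eq_nil_iff.mp hnil a ha
    simp at this
  · intro h
    cases hfe : xs.filter (fun e => pvKey e == k) with
    | nil => exact absurd hfe h
    | cons a t =>
      have hmem : a ∈ xs.filter (fun e => pvKey e == k) := by
        rw [hfe]; exact List.mem_cons_self
      exact List.mem_map.mpr ⟨a, List.mem_of_mem_filter hmem,
        by simpa using List.of_mem_filter hmem⟩

lemma pvFoldA (xs : List pvEpic) :
    (xs.foldl pvAstep ([], PySem.Dict.empty)).1 = PySem.Set.ofList (xs.map pvKey)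
  ∧ (∀ k, ((xs.foldl pvAstep ([], PySem.Dict.empty)).2.contains k = true ↔ k ∈ xs.map pvKey))
  ∧ (∀ k, k ∈ xs.map pvKey →
      (xs.foldl pvAstep ([], PySem.Dict.empty)).2.getD k (none, []) =
        (((xs.filter (fun e => pvKey e == k)).head?.map pvSum).join,
          xs.filter (fun e => pvKey e == k))) := by
  induction xs using List.reverseRecOn with
  | nil =>
      refine ⟨rfl, ?_, ?_⟩
      · intro k; simp [PySem.Dict.contains_empty]
      · intro k hk; simp at hk
  | append_singleton xs e ih =>
      obtain ⟨h1, h2, h3⟩ := ih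
      set st := xs.foldl pvAstep ([], PySem.Dict.empty) with hst
      have hfold : (xs ++ [e]).foldl pvAstep ([], PySem.Dict.empty) = pvAstep st e := by
        simp [List.foldl_append, hst]
      rw [hfold]
      have hfa : ∀ k : Option String, (xs ++ [e]).filter (fun e' => pvKey e' == k) =
          xs.filter (fun e' => pvKey e' == k) ++ (if pvKey e == k then [e] else []) := by
        intro k
        by_cases hk : pvKey e = k <;> simp [List.filter_append, hk]
      by_cases hc : st.2.contains (pvKey e)
      · -- key already present
        have hmem : pvKey e ∈ xs.map pvKey := (h2 _).mp hc
        have hne : xs.filter (fun e' => pvKey e' == pvKey e) ≠ [] :=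
          (pv_mem_key_iff xs _).mp hmem
        simp only [pvAstep] at *
        rw [show pvGet e "initiative_key" = pvKey e from rfl, if_pos hc]
        refine ⟨?_, ?_, ?_⟩
        · rw [h1]
          simp only [List.map_append, List.map_cons, List.map_nil,
            PySem.Set.ofList_append_singleton]
          exact (PySem.Set.add_of_mem ((PySem.Set.mem_ofList _ _).mpr hmem)).symm
        · intro k
          rw [PySem.Dict.contains_modify]
          by_cases hk : k = pvKey e <;> simp [hk, h2 k]
        · intro k hk
          rw [PySem.Dict.getD_modify]
          rw [hfa k]
          by_cases hk2 : k = pvKey e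
          · subst hk2
            rw [if_pos rfl, h3 _ hmem]
            simp [List.head?_append_of_ne_nil _ hne]
          · rw [if_neg hk2]
            have hkx : k ∈ xs.map pvKey := by
              simp only [List.map_append, List.map_cons, List.map_nil, List.mem_append,
                List.mem_cons, List.not_mem_nil] at hk
              rcases hk with h | h
              · exact h
              · exact absurd (by tauto : k = pvKey e) hk2
            rw [h3 _ hkx]
            have hbe : (pvKey e == k) = false := beq_eq_false_iff_ne.mpr (Ne.symm hk2)
            rw [hbe]; simp
      · -- new key
        have hnmem : pvKey e ∉ xs.map pvKey := fun h => hc ((h2 _).mpr h)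
        have hnil : xs.filter (fun e' => pvKey e' == pvKey e) = [] := by
          by_contra h; exact hnmem ((pv_mem_key_iff xs _).mpr h)
        simp only [pvAstep] at *
        rw [show pvGet e "initiative_key" = pvKey e from rfl, if_neg hc]
        refine ⟨?_, ?_, ?_⟩
        · rw [h1]
          simp only [List.map_append, List.map_cons, List.map_nil,
            PySem.Set.ofList_append_singleton]
          exact (PySem.Set.add_of_not_mem (fun h => hnmem ((PySem.Set.mem_ofList _ _).mp h))).symm
        · intro k
          rw [PySem.Dict.contains_modify, PySem.Dict.contains_insert]
          by_cases hk : k = pvKey e <;> simp [hk, h2 k]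
        · intro k hk
          rw [PySem.Dict.getD_modify, hfa k]
          by_cases hk2 : k = pvKey e
          · subst hk2
            rw [if_pos rfl, PySem.Dict.getD_insert_self, hnil]
            simp [pvSum]
          · rw [if_neg hk2, PySem.Dict.getD_insert_of_ne _ _ _ hk2]
            have hkx : k ∈ xs.map pvKey := by
              simp only [List.map_append, List.map_cons, List.map_nil, List.mem_append,
                List.mem_cons, List.not_mem_nil] at hk
              rcases hk with h | h
              · exact h
              · exact absurd (by tauto : k = pvKey e) hk2
            rw [h3 _ hkx]
            have hbe : (pvKey e == k) = false := beq_eq_false_iff_ne.mpr (Ne.symm hk2)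
            rw [hbe]; simp

lemma pv_filter_isSome_eq (l : List (Option String)) :
    l.filter (fun k => k.isSome) = (l.filterMap id).map some := by
  induction l with
  | nil => rfl
  | cons a t ih => cases a <;> simp [ih]

lemma pv_nodup_filterMap_id (l : List (Option String)) (h : l.Nodup) :
    (l.filterMap id).Nodup := by
  induction l with
  | nil => simp
  | cons a t ih =>
    cases a with
    | none => simpa using ih (List.nodup_cons.mp h).2
    | some s =>
      rw [List.filterMap_cons]
      simp only [id]
      refine List.nodup_cons.mpr ⟨?_, ih (List.nodup_cons.mp h).2⟩
      intro hmem
      have : some s ∈ t := by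
        obtain ⟨a, ha, hae⟩ := List.mem_filterMap.mp hmem
        simpa [hae] using ha
      exact (List.nodup_cons.mp h).1 this

lemma pv_sorted_named (l : List (Option String)) (hnd : l.Nodup) :
    PySem.List.sorted (l.filter (fun k => k.isSome)) (fun k => k.getD "") false =
      (PySem.List.sorted (l.filterMap id) (fun s => s) false).map some := by
  apply PySem.List.sorted_eq_of_perm_of_pairwise_lt
  · rw [pv_filter_isSome_eq]
    exact (PySem.List.sorted_perm _ _ _).map some
  · have hp : (PySem.List.sorted (l.filterMap id) (fun s => s) false).Pairwise (· < ·) := by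
      have hle := PySem.List.sorted_pairwise (l.filterMap id) (fun s => s)
      have hnd2 : (PySem.List.sorted (l.filterMap id) (fun s => s) false).Nodup :=
        ((PySem.List.sorted_perm _ _ _).nodup_iff).mpr (pv_nodup_filterMap_id l hnd)
      exact (hle.and hnd2).imp (fun h => lt_of_le_of_ne h.1 h.2)
    rw [List.pairwise_map]
    exact hp.imp (fun h => by simpa using h)

theorem pv_main (epics : List pvEpic) :
    group_by_initiative_py epics = group_by_initiative_py_alt epics := by
  obtain ⟨h1, h2, h3⟩ := pvFoldA epics
  simp only [group_by_initiative_py, group_by_initiative_py_alt]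
  rw [h1]
  rw [show (fun e => pvGet e "initiative_key") = pvKey from rfl]
  rw [pv_sorted_named _ (PySem.Set.nodup_ofList _)]
  have hcond : ((List.foldl pvAstep ([], PySem.Dict.empty) epics).2.contains none) =
      (PySem.Set.ofList (List.map pvKey epics)).contains none := by
    have hiff : ((List.foldl pvAstep ([], PySem.Dict.empty) epics).2.contains none = true) ↔
        ((PySem.Set.ofList (List.map pvKey epics)).contains none = true) := by
      rw [h2, PySem.Set.contains_iff, PySem.Set.mem_ofList]
    exact Bool.eq_iff_iff.mpr hiff
  rw [hcond]
  apply List.map_congr_left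
  intro k hk
  have hmemk : k ∈ List.map pvKey epics := by
    rcases List.mem_append.mp hk with hL | hR
    · obtain ⟨s, hs, rfl⟩ := List.mem_map.mp hL
      have hsS : s ∈ (PySem.Set.ofList (List.map pvKey epics)).filterMap id :=
        (PySem.List.mem_sorted _ _ _ _).mp hs
      obtain ⟨a, ha, hae⟩ := List.mem_filterMap.mp hsS
      have ha' : a = some s := by simpa using hae
      rw [ha'] at ha
      exact (PySem.Set.mem_ofList _ _).mp ha
    · split at hR
      · next h =>
          have : k = none := by simpa using hR
          subst this
          exact (PySem.Set.mem_ofList _ _).mp ((PySem.Set.contains_iff _ _).mp h)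
      · simp at hR
  rw [h3 k hmemk, show pvSum = (fun e => pvGet e "initiative_summary") from rfl]
  simp [pvKey, PySem.List.pyGet?_zero, List.head?_eq_getElem?]

-- ===== VERDICT (by name: the statement is the Claim_ definition above) =====
theorem group_by_initiative_py_spec : Claim_equal_group_by_initiative_py := by
  intro epics _
  unfold Spec_group_by_initiative_py
  exact pv_main epics
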